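-- pv_equiv track=rewrite | github.com/edjiemonyoumbi/swap_puzzle | swap_puzzle/grid.py | de_hashage_a_grille
-- ===== SOURCE A (Python) =====
-- def de_hashage_a_grille(grille):
--
--     l=[]
--     k=[]
--
--     for i in grille:
--         if i=='/':
--             l.append(k)
--
--
--             k=[]
--
--         else:
--             k.append(int(i))
--
--     return l
-- ===== SOURCE B (Python) =====
-- def de_hashage_a_grille(grille):
--     rows = [[int(c) for c in part] for part in grille.split('/')]
--     return rows[:-1]
-- ===== Notes on version B (the rewrite author's own statement) =====
-- stated objective: idiomatic
-- what changed: Replaces the explicit character loop with mutable accumulators by str.split('/') plus a nested comprehension, dropping the trailing segment with a slice.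
import Mathlib
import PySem

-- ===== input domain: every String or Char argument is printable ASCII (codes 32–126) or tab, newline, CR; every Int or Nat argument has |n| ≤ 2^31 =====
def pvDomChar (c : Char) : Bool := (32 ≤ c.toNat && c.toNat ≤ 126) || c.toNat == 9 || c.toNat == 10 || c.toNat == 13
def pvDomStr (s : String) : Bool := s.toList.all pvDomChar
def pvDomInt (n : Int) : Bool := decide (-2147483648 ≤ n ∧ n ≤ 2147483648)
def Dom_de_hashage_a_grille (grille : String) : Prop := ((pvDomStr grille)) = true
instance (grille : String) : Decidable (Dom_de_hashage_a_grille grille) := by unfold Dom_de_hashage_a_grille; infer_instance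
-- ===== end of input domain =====

-- B replaces A's explicit character loop with mutable accumulators by str.split('/')
-- plus a nested comprehension, dropping the trailing segment with a slice (idiomatic).


-- shared helper: int(c) for a single character (exact on digits; Pre_ guarantees we are there)
def pvIntChar (c : Char) : Int := (PySem.Int.ofChars? [c]).getD 0

-- ===== PORT A =====
-- the loop: state (l, k); '/' flushes k into l, other chars append int(i) to k
def de_hashage_a_grille (grille : String) : List (List Int) :=
  (grille.toList.foldl
    (fun (s : List (List Int) × List Int) i =>
      if i = '/' then (s.1 ++ [s.2], ([] : List Int))
      else (s.1, s.2 ++ [pvIntChar i]))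
    (([] : List (List Int)), ([] : List Int))).1

-- ===== PORT B =====
-- rows = [[int(c) for c in part] for part in grille.split('/')]; return rows[:-1]
def de_hashage_a_grille_alt (grille : String) : List (List Int) :=
  let rows := (grille.toList.splitOn '/').map (fun part => part.map pvIntChar)
  PySem.List.slice rows none (some (-1))

-- ===== PRECONDITION & SPEC =====
-- Pre_ excludes exactly the inputs where Python's int(i) raises ValueError:
-- every character must be '/' or a decimal digit.
def Pre_de_hashage_a_grille (grille : String) : Prop :=
  (grille.toList.all (fun c => c == '/' || PySem.Chars.isdigit c)) = true
instance (grille : String) : Decidable (Pre_de_hashage_a_grille grille) := by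
  unfold Pre_de_hashage_a_grille; infer_instance
def pvWitness_de_hashage_a_grille : String := "12/34/"

def Spec_de_hashage_a_grille (grille : String) (out : List (List Int)) : Prop := out = de_hashage_a_grille_alt grille
instance (grille : String) (out : List (List Int)) : Decidable (Spec_de_hashage_a_grille grille out) := by unfold Spec_de_hashage_a_grille; infer_instance

-- ===== CLAIM (what is proved, stated in full; the proofs are below) =====
def Claim_equal_de_hashage_a_grille : Prop := ∀ (grille : String), Dom_de_hashage_a_grille grille → Pre_de_hashage_a_grille grille → Spec_de_hashage_a_grille grille (de_hashage_a_grille grille)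

-- ===== LEMMAS AND PROOFS =====

theorem pv_splitOn_ne_nil (cs : List Char) : cs.splitOn '/' ≠ [] := by
  simpa [List.splitOn] using List.splitOnP_ne_nil (· == '/') cs

-- loop invariant: folding from (l, k) prepends l and merges k into the head row
theorem pv_fold_eq (cs : List Char) : ∀ (l : List (List Int)) (k : List Int),
    (cs.foldl
      (fun (s : List (List Int) × List Int) i =>
        if i = '/' then (s.1 ++ [s.2], ([] : List Int))
        else (s.1, s.2 ++ [pvIntChar i]))
      (l, k)).1
    = l ++ (((cs.splitOn '/').map (fun part => part.map pvIntChar)).modifyHead (k ++ ·)).dropLast := by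
  induction cs with
  | nil => intro l k; simp [List.splitOn]
  | cons c cs ih =>
    intro l k
    obtain ⟨h, t, ht⟩ := List.exists_cons_of_ne_nil (pv_splitOn_ne_nil cs)
    simp only [List.splitOn] at ht
    by_cases hc : c = '/'
    · subst hc
      simp only [List.foldl_cons, ih]
      simp [List.splitOn, List.splitOnP_cons, ht, List.append_assoc]
    · simp only [List.foldl_cons, if_neg hc, ih]
      simp [List.splitOn, List.splitOnP_cons, hc, ht]

-- ===== VERDICT (by name: the statement is the Claim_ definition above) =====
theorem de_hashage_a_grille_spec : Claim_equal_de_hashage_a_grille := by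
  intro grille _ _
  unfold Spec_de_hashage_a_grille de_hashage_a_grille de_hashage_a_grille_alt
  rw [pv_fold_eq]
  obtain ⟨h, t, ht⟩ := List.exists_cons_of_ne_nil (pv_splitOn_ne_nil grille.toList)
  simp [ht, PySem.List.slice_to_neg_one]
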